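-- pv_equiv track=rewrite | github.com/abhinavdv/AI-Project-Manager | backend/services/azure_service.py | _get_mock_analysis
-- ===== SOURCE A (Python) =====
-- def _get_mock_analysis(text):
--     """Generate mock analysis data for demonstration."""
--     # Simple mock implementation
--     words = text.split()
--     key_phrases = []
--     current_phrase = []
--
--     for i, word in enumerate(words):
--         current_phrase.append(word)
--         if i % 3 == 2 or i == len(words) - 1:  # Every 3 words or last word
--             key_phrases.append(" ".join(current_phrase))
--             current_phrase = []
--
--     return {
--         "key_phrases": key_phrases,
--         "entities": [word for word in words if len(word) > 5][:5]  # Just some longer words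
--     }
-- ===== SOURCE B (Python) =====
-- def _get_mock_analysis(text):
--     """Generate mock analysis data for demonstration."""
--     words = text.split()
--     return {
--         "key_phrases": [" ".join(words[i:i + 3]) for i in range(0, len(words), 3)],
--         "entities": [word for word in words if len(word) > 5][:5],
--     }
-- ===== Notes on version B (the rewrite author's own statement) =====
-- stated objective: idiomatic
-- what changed: key_phrases is built by slicing the word list at stepped start indices (range(0, len, 3) with words[i:i+3]) instead of A's accumulator loop with a modulo/last-word flush condition, dropping the running buffer and the flush logic.
import Mathlib
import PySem

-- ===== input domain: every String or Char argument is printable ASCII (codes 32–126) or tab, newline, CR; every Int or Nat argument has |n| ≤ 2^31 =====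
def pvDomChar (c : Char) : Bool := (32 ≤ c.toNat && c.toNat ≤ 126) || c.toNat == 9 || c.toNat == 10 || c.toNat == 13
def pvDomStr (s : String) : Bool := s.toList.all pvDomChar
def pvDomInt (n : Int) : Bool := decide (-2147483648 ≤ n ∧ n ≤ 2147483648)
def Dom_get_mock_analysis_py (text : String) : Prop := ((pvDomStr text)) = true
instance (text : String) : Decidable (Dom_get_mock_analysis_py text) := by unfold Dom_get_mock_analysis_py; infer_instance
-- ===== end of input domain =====

-- B replaces A's accumulator loop (buffer + modulo/last-word flush) for key_phrases by
-- slicing the word list at stepped start indices; same return value, same O(n) cost.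

-- ===== PORT A =====
def get_mock_analysis_py (text : String) : List (String × List String) :=
  let words := PySem.Str.split₀ text
  let res := (PySem.List.enumerate words).foldl
    (fun (st : List String × List String) iw =>
      if PySem.Int.mod iw.1 3 == 2 || iw.1 == (words.length : Int) - 1 then
        (st.1 ++ [PySem.Str.join " " (st.2 ++ [iw.2])], ([] : List String))
      else (st.1, st.2 ++ [iw.2])) ([], [])
  [("key_phrases", res.1),
   ("entities", PySem.List.slice (words.filter (fun w => decide (PySem.Str.len w > 5))) none (some 5))]

-- ===== PORT B =====
def get_mock_analysis_py_alt (text : String) : List (String × List String) :=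
  let words := PySem.Str.split₀ text
  [("key_phrases",
     (PySem.List.pyRange 0 (words.length : Int) 3).map
       (fun i => PySem.Str.join " " (PySem.List.slice words (some i) (some (i + 3))))),
   ("entities", PySem.List.slice (words.filter (fun w => decide (PySem.Str.len w > 5))) none (some 5))]

-- ===== PRECONDITION & SPEC =====
def Spec_get_mock_analysis_py (text : String) (out : List (String × List String)) : Prop := out = get_mock_analysis_py_alt text
instance (text : String) (out : List (String × List String)) : Decidable (Spec_get_mock_analysis_py text out) := by unfold Spec_get_mock_analysis_py; infer_instance

-- ===== CLAIM (what is proved, stated in full; the proofs are below) =====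
def Claim_equal_get_mock_analysis_py : Prop := ∀ (text : String), Dom_get_mock_analysis_py text → Spec_get_mock_analysis_py text (get_mock_analysis_py text)

-- ===== LEMMAS AND PROOFS =====

-- the common value of both key_phrase computations: greedy 3-word chunks
def chunks3 : List String → List String
  | [] => []
  | [a] => [PySem.Str.join " " [a]]
  | [a, b] => [PySem.Str.join " " [a, b]]
  | a :: b :: c :: t => PySem.Str.join " " [a, b, c] :: chunks3 t

theorem pyRange3_nil (a b : Int) (h : b ≤ a) : PySem.List.pyRange a b 3 = [] := by
  rw [PySem.List.pyRange_of_pos a b (by norm_num)]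
  simp [not_lt.mpr h]

theorem pyRange3_cons (a b : Int) (h : a < b) :
    PySem.List.pyRange a b 3 = a :: PySem.List.pyRange (a + 3) b 3 := by
  rw [PySem.List.pyRange_of_pos a b (by norm_num),
      PySem.List.pyRange_of_pos (a + 3) b (by norm_num), if_pos h]
  by_cases h3 : a + 3 < b
  · rw [if_pos h3]
    have hN : ((b - a + 3 - 1) / 3).toNat = ((b - (a + 3) + 3 - 1) / 3).toNat + 1 := by omega
    rw [hN, List.range_succ_eq_map]
    simp only [List.map_cons, List.map_map]
    refine congrArg₂ _ (by simp) ?_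
    refine List.map_congr_left ?_
    intro k _
    simp only [Function.comp]
    push_cast
    ring
  · rw [if_neg h3]
    have hN1 : ((b - a + 3 - 1) / 3).toNat = 1 := by omega
    rw [hN1]
    simp [List.range_one]

theorem modI (j : Int) : PySem.Int.mod j 3 = j % 3 := by
  show Int.fmod j 3 = j % 3
  rw [Int.fmod_eq_emod]
  simp

-- A's accumulator loop over any suffix (starting index k ≡ 0 mod 3, empty buffer) appends chunks3
theorem chunkA (L : Int) :
    ∀ (rest : List String) (k : Nat) (kp : List String),
      k % 3 = 0 → L = (k : Int) + rest.length →
      ((PySem.List.enumerate rest (k : Int)).foldl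
        (fun (st : List String × List String) iw =>
          if PySem.Int.mod iw.1 3 == 2 || iw.1 == L - 1 then
            (st.1 ++ [PySem.Str.join " " (st.2 ++ [iw.2])], ([] : List String))
          else (st.1, st.2 ++ [iw.2])) (kp, [])).1 = kp ++ chunks3 rest := by
  intro rest
  induction rest using chunks3.induct with
  | case1 =>
      intro k kp _ _
      simp [PySem.List.enumerate_nil, chunks3]
  | case2 a =>
      intro k kp hk hL
      simp only [List.length_cons, List.length_nil] at hL
      rw [PySem.List.enumerate_cons, PySem.List.enumerate_nil]
      simp only [List.foldl_cons, List.foldl_nil, modI, Bool.or_eq_true, beq_iff_eq]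
      push_cast at hL
      split_ifs with h1
      · simp [chunks3]
      · exfalso; omega
  | case3 a b =>
      intro k kp hk hL
      simp only [List.length_cons, List.length_nil] at hL
      rw [PySem.List.enumerate_cons, PySem.List.enumerate_cons, PySem.List.enumerate_nil]
      simp only [List.foldl_cons, List.foldl_nil, modI, Bool.or_eq_true, beq_iff_eq]
      push_cast at hL
      split_ifs with h1 h2 h3 <;> first
        | (exfalso; omega)
        | simp [chunks3]
  | case4 a b c t ih =>
      intro k kp hk hL
      simp only [List.length_cons] at hL
      rw [PySem.List.enumerate_cons, PySem.List.enumerate_cons, PySem.List.enumerate_cons]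
      simp only [modI, Bool.or_eq_true, beq_iff_eq] at ih ⊢
      simp only [List.foldl_cons]
      push_cast at hL
      split_ifs with h1 h2 h3 <;> try (exfalso; omega)
      -- surviving branch: no flush at k, k+1, flush at k+2
      simp only [List.nil_append, List.cons_append]
      rw [show ((k : Int) + 1 + 1 + 1) = ((k + 3 : Nat) : Int) by push_cast; ring]
      rw [ih (k + 3) (kp ++ [PySem.Str.join " " [a, b, c]]) (by omega) (by omega)]
      simp [chunks3]

-- B's stepped-range slicing also computes chunks3
theorem chunkB (ws : List String) :
    ∀ (rest : List String) (k : Nat), ws.drop k = rest →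
      (PySem.List.pyRange (k : Int) (ws.length : Int) 3).map
        (fun i => PySem.Str.join " " (PySem.List.slice ws (some i) (some (i + 3)))) = chunks3 rest := by
  intro rest
  induction rest using chunks3.induct with
  | case1 =>
      intro k h
      have hk : ws.length ≤ k := by
        by_contra hc
        have := congrArg List.length h
        simp [List.length_drop] at this
        omega
      rw [pyRange3_nil _ _ (by exact_mod_cast hk)]
      simp [chunks3]
  | case2 a =>
      intro k h
      have hlen : ws.length = k + 1 := by
        have := congrArg List.length h
        simp [List.length_drop] at this
        by_cases hc : k < ws.length <;> omega
      rw [pyRange3_cons _ _ (by omega)]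
      simp only [List.map_cons]
      have hs : PySem.List.slice ws (some (k : Int)) (some ((k : Int) + 3)) = (ws.drop k).take 3 := by
        have := PySem.List.slice_natCast_add ws k 3
        push_cast at this ⊢
        simpa using this
      rw [hs, h]
      rw [pyRange3_nil _ _ (by omega)]
      simp [chunks3]
  | case3 a b =>
      intro k h
      have hlen : ws.length = k + 2 := by
        have := congrArg List.length h
        simp [List.length_drop] at this
        by_cases hc : k < ws.length <;> omega
      rw [pyRange3_cons _ _ (by omega)]
      simp only [List.map_cons]
      have hs : PySem.List.slice ws (some (k : Int)) (some ((k : Int) + 3)) = (ws.drop k).take 3 := by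
        have := PySem.List.slice_natCast_add ws k 3
        push_cast at this ⊢
        simpa using this
      rw [hs, h]
      rw [pyRange3_nil _ _ (by omega)]
      simp [chunks3]
  | case4 a b c t ih =>
      intro k h
      have hlen : ws.length = k + 3 + t.length := by
        have := congrArg List.length h
        simp [List.length_drop] at this
        by_cases hc : k < ws.length <;> omega
      rw [pyRange3_cons _ _ (by omega)]
      simp only [List.map_cons]
      have hs : PySem.List.slice ws (some (k : Int)) (some ((k : Int) + 3)) = (ws.drop k).take 3 := by
        have := PySem.List.slice_natCast_add ws k 3
        push_cast at this ⊢
        simpa using this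
      rw [hs, h]
      have e3 : ((k : Int) + 3) = ((k + 3 : Nat) : Int) := by push_cast; ring
      have hdrop : ws.drop (k + 3) = t := by
        have h2 : (ws.drop k).drop 3 = t := by rw [h]; simp
        rw [← h2, List.drop_drop]
      rw [e3, ih (k + 3) hdrop]
      simp [chunks3]

-- ===== VERDICT (by name: the statement is the Claim_ definition above) =====
theorem get_mock_analysis_py_spec : Claim_equal_get_mock_analysis_py := by
  intro text _
  unfold Spec_get_mock_analysis_py get_mock_analysis_py get_mock_analysis_py_alt
  simp only []
  have hB := chunkB (PySem.Str.split₀ text) (PySem.Str.split₀ text) 0 rfl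
  simp only [Nat.cast_zero] at hB
  rw [hB]
  have hA := chunkA ((PySem.Str.split₀ text).length : Int) (PySem.Str.split₀ text) 0 []
    (by omega) (by push_cast; omega)
  simp only [Nat.cast_zero, List.nil_append] at hA
  rw [hA]
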